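-- pv_equiv track=rewrite | github.com/mohammed-ks02/exercices_aba | jour6/q3.py | solution
-- ===== SOURCE A (Python) =====
-- def solution(a, k):
--     n = len(a)
--     # Initialisation : somme des pairs dans les k premiers éléments
--     somme_pairs = 0
--     for i in range(k):
--         if a[i] % 2 == 0:
--             somme_pairs += a[i]
--
--     result = [somme_pairs]
--
--     # Glissement de la fenêtre
--     for i in range(k, n):
--         # On sort l'élément a[i-k]
--         if a[i - k] % 2 == 0:
--             somme_pairs -= a[i - k]
--         # On ajoute l'élément a[i]
--         if a[i] % 2 == 0:
--             somme_pairs += a[i]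
--         result.append(somme_pairs)
--
--     return result
-- ===== SOURCE B (Python) =====
-- def solution(a, k):
--     n = len(a)
--     # Prefix sums over even elements: P[j] = sum of even values in a[:j]
--     P = [0]
--     for x in a:
--         P.append(P[-1] + (x if x % 2 == 0 else 0))
--     # Each window sum is one O(1) subtraction of prefix sums
--     return [P[i + k] - P[i] for i in range(n - k + 1)]
-- ===== Notes on version B (the rewrite author's own statement) =====
-- stated objective: alternative
-- what changed: Replaces the sliding-window add/subtract accumulator with a prefix-sum array over even elements, so each window is a single subtraction P[i+k]-P[i] instead of incremental window maintenance.
import Mathlib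
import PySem

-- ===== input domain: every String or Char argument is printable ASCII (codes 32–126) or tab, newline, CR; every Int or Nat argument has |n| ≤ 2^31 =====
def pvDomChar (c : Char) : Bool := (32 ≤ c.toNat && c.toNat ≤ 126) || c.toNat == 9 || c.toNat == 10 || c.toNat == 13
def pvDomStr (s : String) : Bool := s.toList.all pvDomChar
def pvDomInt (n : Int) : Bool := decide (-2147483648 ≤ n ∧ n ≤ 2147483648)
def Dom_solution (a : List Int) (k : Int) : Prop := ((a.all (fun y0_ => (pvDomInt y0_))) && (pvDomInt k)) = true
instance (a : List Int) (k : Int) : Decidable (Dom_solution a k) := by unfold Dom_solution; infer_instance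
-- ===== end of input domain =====

-- B replaces A's sliding add/subtract accumulator by a prefix-sum array over even
-- elements and one subtraction per window (alternative decomposition, same O(n)).

-- ===== PORT A =====
def solution (a : List Int) (k : Int) : List Int :=
  let n : Int := PySem.List.len a
  let sommePairs : Int :=
    (PySem.List.pyRange 0 k 1).foldl
      (fun s i =>
        if PySem.Int.mod (PySem.List.pyGetD a i 0) 2 = 0 then s + PySem.List.pyGetD a i 0 else s) 0
  let st :=
    (PySem.List.pyRange k n 1).foldl
      (fun (st : Int × List Int) i =>
        let s1 := if PySem.Int.mod (PySem.List.pyGetD a (i - k) 0) 2 = 0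
                  then st.1 - PySem.List.pyGetD a (i - k) 0 else st.1
        let s2 := if PySem.Int.mod (PySem.List.pyGetD a i 0) 2 = 0
                  then s1 + PySem.List.pyGetD a i 0 else s1
        (s2, st.2 ++ [s2]))
      (sommePairs, [sommePairs])
  st.2

-- ===== PORT B =====
def solution_alt (a : List Int) (k : Int) : List Int :=
  let n : Int := PySem.List.len a
  let P : List Int :=
    a.foldl
      (fun P x =>
        P ++ [PySem.List.pyGetD P (-1) 0 + (if PySem.Int.mod x 2 = 0 then x else 0)])
      [0]
  (PySem.List.pyRange 0 (n - k + 1) 1).map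
    (fun i => PySem.List.pyGetD P (i + k) 0 - PySem.List.pyGetD P i 0)

-- ===== PRECONDITION & SPEC =====
-- Pre_ is exactly the region where Python A returns: for k > len(a) the init loop
-- raises IndexError, and for k < 0 the sliding loop always raises IndexError.
def Pre_solution (a : List Int) (k : Int) : Prop := 0 ≤ k ∧ k ≤ (a.length : Int)
instance (a : List Int) (k : Int) : Decidable (Pre_solution a k) := by unfold Pre_solution; infer_instance
def pvWitness_solution : List Int × Int := ([2, 1, 4], 2)

def Spec_solution (a : List Int) (k : Int) (out : List Int) : Prop := out = solution_alt a k
instance (a : List Int) (k : Int) (out : List Int) : Decidable (Spec_solution a k out) := by unfold Spec_solution; infer_instance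

-- ===== CLAIM (what is proved, stated in full; the proofs are below) =====
def Claim_equal_solution : Prop := ∀ (a : List Int) (k : Int), Dom_solution a k → Pre_solution a k → Spec_solution a k (solution a k)

-- ===== LEMMAS AND PROOFS =====

-- value a branch 'if x % 2 == 0 then … + x else …' adds
def Ev (x : Int) : Int := if PySem.Int.mod x 2 = 0 then x else 0

-- sum of even elements of a[:j]
def Sp (a : List Int) (j : Nat) : Int := ((a.take j).map Ev).sum

lemma Sp_zero (a : List Int) : Sp a 0 = 0 := by simp [Sp]

lemma Sp_succ (a : List Int) (j : Nat) (h : j < a.length) :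
    Sp a (j + 1) = Sp a j + Ev (a.getD j 0) := by
  unfold Sp
  have h' : j < (a.map Ev).length := by simpa using h
  rw [List.map_take, List.map_take, List.sum_take_succ _ j h', List.getElem_map]
  simp [List.getD_eq_getElem?_getD, List.getElem?_eq_getElem h]

lemma Sp_cons (x : Int) (xs : List Int) (j : Nat) :
    Sp (x :: xs) (j + 1) = Ev x + Sp xs j := by
  simp [Sp]

lemma branch_add (s x : Int) :
    (if PySem.Int.mod x 2 = 0 then s + x else s) = s + Ev x := by
  unfold Ev; split_ifs <;> simp

lemma branch_sub (s x : Int) :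
    (if PySem.Int.mod x 2 = 0 then s - x else s) = s - Ev x := by
  unfold Ev; split_ifs <;> simp

lemma loopA1 (a : List Int) (kk : Nat) (hk : kk ≤ a.length) :
    (PySem.List.pyRange 0 (kk : Int) 1).foldl
      (fun s i =>
        if PySem.Int.mod (PySem.List.pyGetD a i 0) 2 = 0 then s + PySem.List.pyGetD a i 0 else s) 0
    = Sp a kk := by
  induction kk with
  | zero => simp [PySem.List.pyRange_one_eq_nil, Sp_zero]
  | succ m ih =>
    have hm : m ≤ a.length := Nat.le_of_succ_le hk
    have hcast : ((m + 1 : Nat) : Int) = (m : Int) + 1 := by push_cast; ring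
    rw [hcast, PySem.List.pyRange_one_succ_right (by positivity), List.foldl_append, ih hm]
    simp only [List.foldl_cons, List.foldl_nil, branch_add]
    rw [PySem.List.pyGetD_natCast, Sp_succ a m (by omega)]

lemma loopA2 (a : List Int) (kk : Nat) (d : Nat) (hd : kk + d ≤ a.length) :
    (PySem.List.pyRange (kk : Int) ((kk + d : Nat) : Int) 1).foldl
      (fun (st : Int × List Int) i =>
        let s1 := if PySem.Int.mod (PySem.List.pyGetD a (i - (kk : Int)) 0) 2 = 0
                  then st.1 - PySem.List.pyGetD a (i - (kk : Int)) 0 else st.1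
        let s2 := if PySem.Int.mod (PySem.List.pyGetD a i 0) 2 = 0
                  then s1 + PySem.List.pyGetD a i 0 else s1
        (s2, st.2 ++ [s2]))
      (Sp a kk, [Sp a kk])
    = (Sp a (kk + d) - Sp a d, (List.range (d + 1)).map (fun j => Sp a (j + kk) - Sp a j)) := by
  induction d with
  | zero => simp [PySem.List.pyRange_one_eq_nil, Sp_zero]
  | succ m ih =>
    have hm : kk + m ≤ a.length := by omega
    have hcast : ((kk + (m + 1) : Nat) : Int) = ((kk + m : Nat) : Int) + 1 := by push_cast; ring
    rw [hcast, PySem.List.pyRange_one_succ_right (by exact_mod_cast Nat.le_add_right kk m),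
        List.foldl_append, ih hm]
    simp only [List.foldl_cons, List.foldl_nil]
    have h1 : ((kk + m : Nat) : Int) - (kk : Int) = ((m : Nat) : Int) := by push_cast; ring
    rw [h1]
    simp only [branch_add, branch_sub, PySem.List.pyGetD_natCast]
    rw [show Sp a (kk + m) - Sp a m - Ev (a.getD m 0) + Ev (a.getD (kk + m) 0)
          = (Sp a (kk + m) + Ev (a.getD (kk + m) 0)) - (Sp a m + Ev (a.getD m 0)) by ring]
    rw [← Sp_succ a (kk + m) (by omega), ← Sp_succ a m (by omega)]
    rw [show kk + (m + 1) = kk + m + 1 by ring]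
    refine Prod.ext rfl ?_
    conv_rhs => rw [List.range_succ, List.map_append, List.map_singleton]
    rw [show m + 1 + kk = kk + m + 1 by ring]

-- prefix-sum list built by B's loop
def pref (c : Int) : List Int → List Int
  | [] => []
  | x :: xs => (c + Ev x) :: pref (c + Ev x) xs

lemma pref_foldl (l : List Int) : ∀ (Q : List Int) (c : Int),
    l.foldl
      (fun P x =>
        P ++ [PySem.List.pyGetD P (-1) 0 + (if PySem.Int.mod x 2 = 0 then x else 0)])
      (Q ++ [c])
    = (Q ++ [c]) ++ pref c l := by
  induction l with
  | nil => intro Q c; simp [pref]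
  | cons x xs ih =>
    intro Q c
    simp only [List.foldl_cons, PySem.List.pyGetD_neg_one_append_singleton]
    have : (Q ++ [c]) ++ [c + (if PySem.Int.mod x 2 = 0 then x else 0)]
         = (Q ++ [c]) ++ [c + Ev x] := by rfl
    rw [this, ih (Q ++ [c]) (c + Ev x)]
    simp [pref]

lemma pref_eq (l : List Int) : ∀ (c : Int),
    pref c l = (List.range l.length).map (fun j => c + Sp l (j + 1)) := by
  induction l with
  | nil => intro c; simp [pref]
  | cons x xs ih =>
    intro c
    simp only [pref, ih (c + Ev x), List.length_cons, List.range_succ_eq_map,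
      List.map_cons, List.map_map]
    congr 1
    · simp [Sp_cons, Sp_zero]
    · apply List.map_congr_left
      intro j _
      simp [Function.comp, Sp_cons]; ring

lemma P_getD (a : List Int) (j : Nat) (hj : j ≤ a.length) :
    ((0 : Int) :: (List.range a.length).map (fun i => 0 + Sp a (i + 1))).getD j 0 = Sp a j := by
  cases j with
  | zero => simp [Sp_zero]
  | succ m =>
    have hm : m < a.length := by omega
    simp [List.getD_eq_getElem?_getD, List.getElem?_map, List.getElem?_range hm]

theorem solution_eq_alt (a : List Int) (k : Int) (h0 : 0 ≤ k) (h1 : k ≤ (a.length : Int)) :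
    solution a k = solution_alt a k := by
  obtain ⟨kk, rfl⟩ : ∃ kk : Nat, k = (kk : Int) := ⟨k.toNat, (Int.toNat_of_nonneg h0).symm⟩
  have hk : kk ≤ a.length := by exact_mod_cast h1
  set d := a.length - kk with hd
  have hlen : a.length = kk + d := by omega
  -- A side
  unfold solution
  simp only [PySem.List.len_eq]
  rw [loopA1 a kk hk]
  rw [show (a.length : Int) = ((kk + d : Nat) : Int) by rw [hlen]]
  rw [loopA2 a kk d (by omega)]
  -- B side
  unfold solution_alt
  simp only [PySem.List.len_eq]
  rw [show ([0] : List Int) = [] ++ [(0 : Int)] by simp, pref_foldl a [] 0, pref_eq a 0]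
  simp only [List.nil_append, List.singleton_append]
  rw [show (a.length : Int) - (kk : Int) + 1 = ((d + 1 : Nat) : Int) by push_cast; omega]
  rw [PySem.List.pyRange_one]
  simp only [Int.sub_zero, Int.toNat_natCast, List.map_map]
  apply List.map_congr_left
  intro j hj
  have hjd : j ≤ d := by
    have := List.mem_range.mp hj; omega
  simp only [Function.comp]
  rw [show (0 : Int) + (j : Int) + (kk : Int) = ((j + kk : Nat) : Int) by push_cast; ring,
      show (0 : Int) + (j : Int) = ((j : Nat) : Int) by ring]
  rw [PySem.List.pyGetD_natCast, PySem.List.pyGetD_natCast]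
  rw [P_getD a (j + kk) (by omega), P_getD a j (by omega)]

-- ===== VERDICT (by name: the statement is the Claim_ definition above) =====
theorem solution_spec : Claim_equal_solution := by
  intro a k _ hpre
  exact solution_eq_alt a k hpre.1 hpre.2
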